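-- pv_equiv track=rewrite | github.com/ctensmeyer/formCluster | cluster/label.py | strip_prefixes
-- ===== SOURCE A (Python) =====
-- prefixes = ['UK1911Census_EnglandWales_', 'UK1911_Census_', 'FormTypeDate_']
--
-- def strip_prefixes(s):
-- 	l = 0
-- 	while len(s) != l:
-- 		l = len(s)
-- 		for prefix in prefixes:
-- 			if s.startswith(prefix):
-- 				s = s[len(prefix):]
-- 	return s
-- ===== SOURCE B (Python) =====
-- prefixes = ['UK1911Census_EnglandWales_', 'UK1911_Census_', 'FormTypeDate_']
--
-- def strip_prefixes(s):
-- 	# direct recursion: strip the first matching prefix and restart; return when none matches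
-- 	for prefix in prefixes:
-- 		if s.startswith(prefix):
-- 			return strip_prefixes(s[len(prefix):])
-- 	return s
-- ===== Notes on version B (the rewrite author's own statement) =====
-- stated objective: simpler
-- what changed: Replaces A's iterate-until-stable outer while loop with a length sentinel (each pass trying every prefix) by a direct recursion that strips the first matching prefix and restarts, returning as soon as no prefix matches.
import Mathlib
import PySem

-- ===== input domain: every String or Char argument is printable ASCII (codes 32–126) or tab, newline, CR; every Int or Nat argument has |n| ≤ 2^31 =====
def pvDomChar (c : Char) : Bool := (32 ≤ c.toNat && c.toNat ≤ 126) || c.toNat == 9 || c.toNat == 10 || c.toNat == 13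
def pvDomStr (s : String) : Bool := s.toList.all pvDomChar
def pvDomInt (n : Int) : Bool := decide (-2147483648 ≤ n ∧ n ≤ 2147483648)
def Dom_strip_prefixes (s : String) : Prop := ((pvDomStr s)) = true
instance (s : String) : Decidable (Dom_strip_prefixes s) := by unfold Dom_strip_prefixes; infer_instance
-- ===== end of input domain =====

-- B replaces A's iterate-until-stable while loop (length sentinel, full pass over the
-- prefixes each round) by a direct recursion stripping the first matching prefix; simpler.

-- ===== PORT A =====
-- the module constant `prefixes`; strings are worked on via .toList: s.startswith(p) is
-- PySem.Chars.startswith, s[len(prefix):] is List.drop (exact for a nonnegative start,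
-- cf. PySem.List.slice_from_natCast)
def pvPrefixesL : List (List Char) :=
  ["UK1911Census_EnglandWales_".toList, "UK1911_Census_".toList, "FormTypeDate_".toList]

-- the body of A's `for prefix in prefixes` loop (one pass)
def pvPassA (l : List Char) : List Char :=
  pvPrefixesL.foldl (fun s p => if PySem.Chars.startswith s p then s.drop p.length else s) l

-- A's `while len(s) != l` loop; fuel is a pure totality guard (length+2 iterations always
-- suffice: each pass either strictly shortens s or leaves it fixed, ending the loop)
def pvLoopA : Nat → List Char → Int → List Char
  | 0, s, _ => s
  | f + 1, s, l => if (s.length : Int) ≠ l then pvLoopA f (pvPassA s) s.length else s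

def strip_prefixes (s : String) : String :=
  String.ofList (pvLoopA (s.toList.length + 2) s.toList 0)

-- ===== PORT B =====
-- B's `for prefix in prefixes: if s.startswith(prefix): return strip_prefixes(s[len(prefix):])`
-- is find?-of-first-match followed by the recursive call; the trailing `return s` is the none case
theorem pvPrefixesL_pos {p : List Char} (hp : p ∈ pvPrefixesL) : 0 < p.length := by
  fin_cases hp <;> decide

def pvAltGo (l : List Char) : List Char :=
  match h : pvPrefixesL.find? (fun p => PySem.Chars.startswith l p) with
  | some p => pvAltGo (l.drop p.length)
  | none => l
termination_by l.length
decreasing_by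
  have hmem := List.mem_of_find?_eq_some h
  have hsw := List.find?_some h
  have hpre : p <+: l := (PySem.Chars.startswith_iff l p).mp (by simpa using hsw)
  have hlen : p.length ≤ l.length := hpre.length_le
  have hpos := pvPrefixesL_pos hmem
  simp [List.length_drop]; omega

def strip_prefixes_alt (s : String) : String := String.ofList (pvAltGo s.toList)

-- ===== PRECONDITION & SPEC =====
def Spec_strip_prefixes (s : String) (out : String) : Prop := out = strip_prefixes_alt s
instance (s : String) (out : String) : Decidable (Spec_strip_prefixes s out) := by unfold Spec_strip_prefixes; infer_instance

-- ===== CLAIM (what is proved, stated in full; the proofs are below) =====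
def Claim_equal_strip_prefixes : Prop := ∀ (s : String), Dom_strip_prefixes s → Spec_strip_prefixes s (strip_prefixes s)

-- ===== LEMMAS AND PROOFS =====

-- no two distinct prefixes can both match the same string (none is a prefix of another)
theorem pv_excl {l p q : List Char} (hp : p ∈ pvPrefixesL) (hq : q ∈ pvPrefixesL)
    (hne : p ≠ q) (hpl : p <+: l) (hql : q <+: l) : False := by
  simp only [pvPrefixesL, List.mem_cons, List.not_mem_nil, or_false] at hp hq
  rcases hp with rfl | rfl | rfl <;> rcases hq with rfl | rfl | rfl
  · exact hne rfl
  · rcases List.prefix_or_prefix_of_prefix hpl hql with h | h <;> revert h <;> decide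
  · rcases List.prefix_or_prefix_of_prefix hpl hql with h | h <;> revert h <;> decide
  · rcases List.prefix_or_prefix_of_prefix hpl hql with h | h <;> revert h <;> decide
  · exact hne rfl
  · rcases List.prefix_or_prefix_of_prefix hpl hql with h | h <;> revert h <;> decide
  · rcases List.prefix_or_prefix_of_prefix hpl hql with h | h <;> revert h <;> decide
  · rcases List.prefix_or_prefix_of_prefix hpl hql with h | h <;> revert h <;> decide
  · exact hne rfl

theorem pv_not_sw {l p q : List Char} (hp : p ∈ pvPrefixesL) (hq : q ∈ pvPrefixesL)
    (hne : q ≠ p) (hsw : PySem.Chars.startswith l p = true) :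
    PySem.Chars.startswith l q = false := by
  cases heq : PySem.Chars.startswith l q
  · rfl
  · exact absurd (pv_excl hq hp hne ((PySem.Chars.startswith_iff l q).mp heq)
      ((PySem.Chars.startswith_iff l p).mp hsw)) (by simp)

-- stripping one genuinely-matching prefix preserves B's normal form
theorem pvAltGo_step {l p : List Char} (hp : p ∈ pvPrefixesL)
    (hsw : PySem.Chars.startswith l p = true) :
    pvAltGo (l.drop p.length) = pvAltGo l := by
  have hfind : pvPrefixesL.find? (fun q => PySem.Chars.startswith l q) = some p := by
    simp only [pvPrefixesL, List.mem_cons, List.not_mem_nil, or_false] at hp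
    rcases hp with rfl | rfl | rfl
    · simp only [pvPrefixesL]
      rw [List.find?_cons_of_pos (by simpa using hsw)]
    · have h1 := pv_not_sw (q := "UK1911Census_EnglandWales_".toList)
        (by simp [pvPrefixesL]) (by simp [pvPrefixesL]) (by decide) hsw
      simp only [pvPrefixesL]
      rw [List.find?_cons_of_neg (by simpa using h1),
        List.find?_cons_of_pos (by simpa using hsw)]
    · have h1 := pv_not_sw (q := "UK1911Census_EnglandWales_".toList)
        (by simp [pvPrefixesL]) (by simp [pvPrefixesL]) (by decide) hsw
      have h2 := pv_not_sw (q := "UK1911_Census_".toList)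
        (by simp [pvPrefixesL]) (by simp [pvPrefixesL]) (by decide) hsw
      simp only [pvPrefixesL]
      rw [List.find?_cons_of_neg (by simpa using h1),
        List.find?_cons_of_neg (by simpa using h2),
        List.find?_cons_of_pos (by simpa using hsw)]
  conv_rhs => rw [pvAltGo]
  split
  · rename_i q hq
    rw [hfind] at hq
    injection hq with hq
    rw [hq]
  · rename_i hq
    rw [hfind] at hq
    exact absurd hq (by simp)

-- one pass of A either strictly shortens the string, or fixes it with no prefix matching
theorem pvPass_len (l : List Char) :
    (pvPassA l).length < l.length ∨
      (pvPassA l = l ∧ ∀ p ∈ pvPrefixesL, PySem.Chars.startswith l p = false) := by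
  have e1 : ("UK1911Census_EnglandWales_".toList).length = 26 := by decide
  have e2 : ("UK1911_Census_".toList).length = 14 := by decide
  have e3 : ("FormTypeDate_".toList).length = 13 := by decide
  simp only [pvPassA, pvPrefixesL, List.foldl, e1, e2, e3]
  split_ifs with h1 h2 h3 h4 h5 h6 h7
  all_goals first
    | (right
       refine ⟨rfl, ?_⟩
       intro p hp
       simp only [pvPrefixesL, List.mem_cons, List.not_mem_nil, or_false] at hp
       rcases hp with rfl | rfl | rfl <;> simp_all)
    | (left
       try have b1 := ((PySem.Chars.startswith_iff _ _).mp h1).length_le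
       try have b2 := ((PySem.Chars.startswith_iff _ _).mp h2).length_le
       try have b3 := ((PySem.Chars.startswith_iff _ _).mp h3).length_le
       try have b4 := ((PySem.Chars.startswith_iff _ _).mp h4).length_le
       try have b5 := ((PySem.Chars.startswith_iff _ _).mp h5).length_le
       try have b6 := ((PySem.Chars.startswith_iff _ _).mp h6).length_le
       try have b7 := ((PySem.Chars.startswith_iff _ _).mp h7).length_le
       simp only [List.length_drop, e1, e2, e3] at *
       omega)

-- a pass doing nothing means l is already B's normal form
theorem pvAltGo_fix {l : List Char} (h : pvPassA l = l) : pvAltGo l = l := by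
  rcases pvPass_len l with hlt | ⟨_, hnone⟩
  · rw [h] at hlt; omega
  · rw [pvAltGo]
    rw [List.find?_eq_none.mpr (by intro p hp; simp [hnone p hp])]

-- one pass of A preserves B's normal form
theorem pv_step1 {x : List Char}
    (h : PySem.Chars.startswith x "UK1911Census_EnglandWales_".toList = true) :
    pvAltGo (x.drop 26) = pvAltGo x := by
  have hs := pvAltGo_step (p := "UK1911Census_EnglandWales_".toList) (by simp [pvPrefixesL]) h
  rwa [show ("UK1911Census_EnglandWales_".toList).length = 26 from by decide] at hs

theorem pv_step2 {x : List Char}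
    (h : PySem.Chars.startswith x "UK1911_Census_".toList = true) :
    pvAltGo (x.drop 14) = pvAltGo x := by
  have hs := pvAltGo_step (p := "UK1911_Census_".toList) (by simp [pvPrefixesL]) h
  rwa [show ("UK1911_Census_".toList).length = 14 from by decide] at hs

theorem pv_step3 {x : List Char}
    (h : PySem.Chars.startswith x "FormTypeDate_".toList = true) :
    pvAltGo (x.drop 13) = pvAltGo x := by
  have hs := pvAltGo_step (p := "FormTypeDate_".toList) (by simp [pvPrefixesL]) h
  rwa [show ("FormTypeDate_".toList).length = 13 from by decide] at hs

-- one pass of A preserves B's normal form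
theorem pvAltGo_pass (l : List Char) : pvAltGo (pvPassA l) = pvAltGo l := by
  have e1 : ("UK1911Census_EnglandWales_".toList).length = 26 := by decide
  have e2 : ("UK1911_Census_".toList).length = 14 := by decide
  have e3 : ("FormTypeDate_".toList).length = 13 := by decide
  simp only [pvPassA, pvPrefixesL, List.foldl, e1, e2, e3]
  split_ifs with h1 h2 h3 h4 h5 h6 h7
  · rw [pv_step3 h3, pv_step2 h2, pv_step1 h1]
  · rw [pv_step2 h2, pv_step1 h1]
  · rw [pv_step3 h4, pv_step1 h1]
  · exact pv_step1 h1
  · rw [pv_step3 h6, pv_step2 h5]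
  · exact pv_step2 h5
  · exact pv_step3 h7
  · rfl

-- A's loop computes B's normal form given enough fuel
theorem pvLoopA_correct : ∀ (f : Nat) (l : List Char) (ll : Int),
    l.length + 1 ≤ f → ((ll = (l.length : Int)) → pvAltGo l = l) →
    pvLoopA f l ll = pvAltGo l := by
  intro f
  induction f with
  | zero => intro l ll h _; omega
  | succ f ih =>
    intro l ll hf hfix
    simp only [pvLoopA]
    by_cases hc : (l.length : Int) ≠ ll
    · rw [if_pos hc]
      by_cases hfixp : pvPassA l = l
      · have hnf : pvAltGo l = l := pvAltGo_fix hfixp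
        rw [hfixp]
        cases f with
        | zero => simpa using hnf.symm
        | succ f' => simp only [pvLoopA]; simp [hnf]
      · have hlt : (pvPassA l).length < l.length := by
          rcases pvPass_len l with hlt | ⟨hfx, _⟩
          · exact hlt
          · exact absurd hfx hfixp
        rw [ih (pvPassA l) l.length (by omega) (by intro he; exfalso; omega), pvAltGo_pass]
    · rw [if_neg hc]
      exact (hfix (by push Not at hc; omega)).symm

theorem pvAltGo_nil : pvAltGo [] = [] := by
  rw [pvAltGo]
  rw [List.find?_eq_none.mpr (by intro p hp; fin_cases hp <;> decide)]

-- ===== VERDICT (by name: the statement is the Claim_ definition above) =====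
theorem strip_prefixes_spec : Claim_equal_strip_prefixes := by
  intro s _
  unfold Spec_strip_prefixes strip_prefixes strip_prefixes_alt
  rw [pvLoopA_correct (s.toList.length + 2) s.toList 0 (by omega)]
  intro h0
  have hnil : s.toList = [] := List.length_eq_zero_iff.mp (by omega)
  rw [hnil, pvAltGo_nil]
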